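-- pv_equiv track=rewrite | github.com/Kunritty/connections-solver | conn/metrics.py | correct_word_count
-- ===== SOURCE A (Python) =====
-- from itertools import permutations
--
-- def _norm(g: list) -> frozenset:
--     return frozenset(w.strip().upper() for w in g)
--
-- def correct_word_count(pred_groups: list[list[str]], gold_groups: list[list[str]]) -> int:
--     """Max number of words in correct position over all 4! alignments of pred to gold."""
--     if not pred_groups or len(pred_groups) != 4 or len(gold_groups) != 4:
--         return 0
--     if any(len(g) != 4 for g in pred_groups) or any(len(g) != 4 for g in gold_groups):
--         return 0
--     pred_sets = [_norm(g) for g in pred_groups]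
--     gold_sets = [_norm(g) for g in gold_groups]
--     return max(
--         sum(len(pred_sets[j] & gold_sets[pi[j]]) for j in range(4))
--         for pi in permutations(range(4))
--     )
-- ===== SOURCE B (Python) =====
-- def _norm(g: list) -> frozenset:
--     return frozenset(w.strip().upper() for w in g)
--
-- def correct_word_count(pred_groups: list[list[str]], gold_groups: list[list[str]]) -> int:
--     """Max number of words in correct position over all alignments, by backtracking."""
--     if not pred_groups or len(pred_groups) != 4 or len(gold_groups) != 4:
--         return 0
--     if any(len(g) != 4 for g in pred_groups) or any(len(g) != 4 for g in gold_groups):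
--         return 0
--     pred_sets = [_norm(g) for g in pred_groups]
--     gold_sets = [_norm(g) for g in gold_groups]
--     M = [[len(p & g) for g in gold_sets] for p in pred_sets]
--
--     def best(j, used):
--         if j == 4:
--             return 0
--         return max(M[j][g] + best(j + 1, used | (1 << g)) for g in range(4) if not used & (1 << g))
--
--     return best(0, 0)
-- ===== Notes on version B (the rewrite author's own statement) =====
-- stated objective: alternative
-- what changed: Replaces the itertools.permutations scan of all 24 alignments with a precomputed 4x4 overlap matrix and a recursive backtracking assignment over a used-set of gold groups.
import Mathlib
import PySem

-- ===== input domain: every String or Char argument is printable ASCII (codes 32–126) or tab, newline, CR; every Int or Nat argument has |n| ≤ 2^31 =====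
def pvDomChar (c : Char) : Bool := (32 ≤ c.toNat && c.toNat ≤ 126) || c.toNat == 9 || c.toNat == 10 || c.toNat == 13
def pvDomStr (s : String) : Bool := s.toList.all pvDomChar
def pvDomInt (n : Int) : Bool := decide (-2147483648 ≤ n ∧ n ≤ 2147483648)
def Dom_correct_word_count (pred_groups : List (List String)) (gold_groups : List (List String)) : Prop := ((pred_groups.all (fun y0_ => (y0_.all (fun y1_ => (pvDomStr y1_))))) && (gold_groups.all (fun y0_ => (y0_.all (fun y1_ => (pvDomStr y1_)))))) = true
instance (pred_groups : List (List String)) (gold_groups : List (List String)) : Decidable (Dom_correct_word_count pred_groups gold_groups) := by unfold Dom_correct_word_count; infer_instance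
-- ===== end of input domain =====

-- B replaces the 24-permutation scan with a 4x4 overlap matrix plus recursive backtracking over a used-set; same result, proved equal.

-- ===== PORT A =====
-- _norm: frozenset(w.strip().upper() for w in g)
def pvNorm (g : List String) : PySem.Set String :=
  PySem.Set.ofList (g.map (fun w => PySem.Str.upper (PySem.Str.strip w)))

-- itertools.permutations(range(4)) in its (lexicographic) order
def pvPerms4 : List (List Nat) :=
  [[0,1,2,3],[0,1,3,2],[0,2,1,3],[0,2,3,1],[0,3,1,2],[0,3,2,1],
   [1,0,2,3],[1,0,3,2],[1,2,0,3],[1,2,3,0],[1,3,0,2],[1,3,2,0],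
   [2,0,1,3],[2,0,3,1],[2,1,0,3],[2,1,3,0],[2,3,0,1],[2,3,1,0],
   [3,0,1,2],[3,0,2,1],[3,1,0,2],[3,1,2,0],[3,2,0,1],[3,2,1,0]]

def correct_word_count (pred_groups : List (List String)) (gold_groups : List (List String)) : Int :=
  if pred_groups.isEmpty || pred_groups.length != 4 || gold_groups.length != 4 then 0
  else if pred_groups.any (fun g => g.length != 4) || gold_groups.any (fun g => g.length != 4) then 0
  else
    let pred_sets := pred_groups.map pvNorm
    let gold_sets := gold_groups.map pvNorm
    -- the indices are always in range here (both lists have length 4), so getD is exact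
    ((PySem.List.max? (pvPerms4.map (fun pi =>
        ([0,1,2,3] : List Nat).foldl (fun acc j =>
          acc + PySem.Set.len (PySem.Set.inter (pred_sets.getD j [])
                                               (gold_sets.getD (pi.getD j 0) []))) 0))
      (fun x => x)).getD 0)

-- ===== PORT B =====
-- best(j, used): recursion over the rows of M still to assign; used = gold indices taken
def pvBest : List (List Int) → Nat → Int
  | [], _ => 0
  | row :: rest, used =>
      ((PySem.List.max? ((([0,1,2,3] : List Nat).filter (fun g => used &&& (1 <<< g) == 0)).map
          (fun g => row.getD g 0 + pvBest rest (used ||| (1 <<< g))))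
        (fun x => x)).getD 0)

def correct_word_count_alt (pred_groups : List (List String)) (gold_groups : List (List String)) : Int :=
  if pred_groups.isEmpty || pred_groups.length != 4 || gold_groups.length != 4 then 0
  else if pred_groups.any (fun g => g.length != 4) || gold_groups.any (fun g => g.length != 4) then 0
  else
    let pred_sets := pred_groups.map pvNorm
    let gold_sets := gold_groups.map pvNorm
    let M := pred_sets.map (fun p => gold_sets.map (fun g => PySem.Set.len (PySem.Set.inter p g)))
    pvBest M 0

-- ===== PRECONDITION & SPEC =====
def Spec_correct_word_count (pred_groups : List (List String)) (gold_groups : List (List String)) (out : Int) : Prop := out = correct_word_count_alt pred_groups gold_groups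
instance (pred_groups : List (List String)) (gold_groups : List (List String)) (out : Int) : Decidable (Spec_correct_word_count pred_groups gold_groups out) := by unfold Spec_correct_word_count; infer_instance

-- ===== CLAIM (what is proved, stated in full; the proofs are below) =====
def Claim_equal_correct_word_count : Prop := ∀ (pred_groups : List (List String)) (gold_groups : List (List String)), Dom_correct_word_count pred_groups gold_groups → Spec_correct_word_count pred_groups gold_groups (correct_word_count pred_groups gold_groups)

-- ===== LEMMAS AND PROOFS =====

theorem pvLen4 {α : Type} (l : List α) (h : l.length = 4) :
    ∃ a b c d, l = [a, b, c, d] := by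
  rcases l with _ | ⟨a, _ | ⟨b, _ | ⟨c, _ | ⟨d, _ | ⟨e, t⟩⟩⟩⟩⟩ <;> simp at h
  exact ⟨a, b, c, d, rfl⟩

-- the arithmetic core: the 24-permutation maximum equals the backtracking maximum, for any overlaps
theorem pvAddMax (a b c : Int) : a + max b c = max (a + b) (a + c) := by omega

theorem pvGetD4_0 {α : Type} (x0 x1 x2 x3 : α) (d : α) : [x0, x1, x2, x3].getD 0 d = x0 := rfl
theorem pvGetD4_1 {α : Type} (x0 x1 x2 x3 : α) (d : α) : [x0, x1, x2, x3].getD 1 d = x1 := rfl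
theorem pvGetD4_2 {α : Type} (x0 x1 x2 x3 : α) (d : α) : [x0, x1, x2, x3].getD 2 d = x2 := rfl
theorem pvGetD4_3 {α : Type} (x0 x1 x2 x3 : α) (d : α) : [x0, x1, x2, x3].getD 3 d = x3 := rfl

theorem pvBest_m7 (a : List Int) :
    pvBest [a] 7 = a.getD 3 0 := by
  simp [pvBest, PySem.List.max?_id_cons]

theorem pvBest_m11 (a : List Int) :
    pvBest [a] 11 = a.getD 2 0 := by
  simp [pvBest, PySem.List.max?_id_cons]

theorem pvBest_m13 (a : List Int) :
    pvBest [a] 13 = a.getD 1 0 := by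
  simp [pvBest, PySem.List.max?_id_cons]

theorem pvBest_m14 (a : List Int) :
    pvBest [a] 14 = a.getD 0 0 := by
  simp [pvBest, PySem.List.max?_id_cons]

theorem pvBest_m3 (a b : List Int) :
    pvBest [a, b] 3 = max (a.getD 2 0 + (b.getD 3 0)) (a.getD 3 0 + (b.getD 2 0)) := by
  conv_lhs => rw [pvBest]
  simp [pvBest_m7, pvBest_m11, PySem.List.max?_id_cons]

theorem pvBest_m5 (a b : List Int) :
    pvBest [a, b] 5 = max (a.getD 1 0 + (b.getD 3 0)) (a.getD 3 0 + (b.getD 1 0)) := by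
  conv_lhs => rw [pvBest]
  simp [pvBest_m7, pvBest_m13, PySem.List.max?_id_cons]

theorem pvBest_m6 (a b : List Int) :
    pvBest [a, b] 6 = max (a.getD 0 0 + (b.getD 3 0)) (a.getD 3 0 + (b.getD 0 0)) := by
  conv_lhs => rw [pvBest]
  simp [pvBest_m7, pvBest_m14, PySem.List.max?_id_cons]

theorem pvBest_m9 (a b : List Int) :
    pvBest [a, b] 9 = max (a.getD 1 0 + (b.getD 2 0)) (a.getD 2 0 + (b.getD 1 0)) := by
  conv_lhs => rw [pvBest]
  simp [pvBest_m11, pvBest_m13, PySem.List.max?_id_cons]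

theorem pvBest_m10 (a b : List Int) :
    pvBest [a, b] 10 = max (a.getD 0 0 + (b.getD 2 0)) (a.getD 2 0 + (b.getD 0 0)) := by
  conv_lhs => rw [pvBest]
  simp [pvBest_m11, pvBest_m14, PySem.List.max?_id_cons]

theorem pvBest_m12 (a b : List Int) :
    pvBest [a, b] 12 = max (a.getD 0 0 + (b.getD 1 0)) (a.getD 1 0 + (b.getD 0 0)) := by
  conv_lhs => rw [pvBest]
  simp [pvBest_m13, pvBest_m14, PySem.List.max?_id_cons]

theorem pvBest_m1 (a b c : List Int) :
    pvBest [a, b, c] 1 = max (max (max (max (max (a.getD 1 0 + (b.getD 2 0 + (c.getD 3 0))) (a.getD 1 0 + (b.getD 3 0 + (c.getD 2 0)))) (a.getD 2 0 + (b.getD 1 0 + (c.getD 3 0)))) (a.getD 2 0 + (b.getD 3 0 + (c.getD 1 0)))) (a.getD 3 0 + (b.getD 1 0 + (c.getD 2 0)))) (a.getD 3 0 + (b.getD 2 0 + (c.getD 1 0))) := by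
  conv_lhs => rw [pvBest]
  simp [pvBest_m3, pvBest_m5, pvBest_m9, PySem.List.max?_id_cons]

theorem pvBest_m2 (a b c : List Int) :
    pvBest [a, b, c] 2 = max (max (max (max (max (a.getD 0 0 + (b.getD 2 0 + (c.getD 3 0))) (a.getD 0 0 + (b.getD 3 0 + (c.getD 2 0)))) (a.getD 2 0 + (b.getD 0 0 + (c.getD 3 0)))) (a.getD 2 0 + (b.getD 3 0 + (c.getD 0 0)))) (a.getD 3 0 + (b.getD 0 0 + (c.getD 2 0)))) (a.getD 3 0 + (b.getD 2 0 + (c.getD 0 0))) := by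
  conv_lhs => rw [pvBest]
  simp [pvBest_m3, pvBest_m6, pvBest_m10, PySem.List.max?_id_cons]

theorem pvBest_m4 (a b c : List Int) :
    pvBest [a, b, c] 4 = max (max (max (max (max (a.getD 0 0 + (b.getD 1 0 + (c.getD 3 0))) (a.getD 0 0 + (b.getD 3 0 + (c.getD 1 0)))) (a.getD 1 0 + (b.getD 0 0 + (c.getD 3 0)))) (a.getD 1 0 + (b.getD 3 0 + (c.getD 0 0)))) (a.getD 3 0 + (b.getD 0 0 + (c.getD 1 0)))) (a.getD 3 0 + (b.getD 1 0 + (c.getD 0 0))) := by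
  conv_lhs => rw [pvBest]
  simp [pvBest_m5, pvBest_m6, pvBest_m12, PySem.List.max?_id_cons]

theorem pvBest_m8 (a b c : List Int) :
    pvBest [a, b, c] 8 = max (max (max (max (max (a.getD 0 0 + (b.getD 1 0 + (c.getD 2 0))) (a.getD 0 0 + (b.getD 2 0 + (c.getD 1 0)))) (a.getD 1 0 + (b.getD 0 0 + (c.getD 2 0)))) (a.getD 1 0 + (b.getD 2 0 + (c.getD 0 0)))) (a.getD 2 0 + (b.getD 0 0 + (c.getD 1 0)))) (a.getD 2 0 + (b.getD 1 0 + (c.getD 0 0))) := by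
  conv_lhs => rw [pvBest]
  simp [pvBest_m9, pvBest_m10, pvBest_m12, PySem.List.max?_id_cons]

set_option maxHeartbeats 2000000 in
theorem pvBest_m0 (a b c d : List Int) :
    pvBest [a, b, c, d] 0 = max (max (max (max (max (max (max (max (max (max (max (max (max (max (max (max (max (max (max (max (max (max (max (a.getD 0 0 + (b.getD 1 0 + (c.getD 2 0 + (d.getD 3 0)))) (a.getD 0 0 + (b.getD 1 0 + (c.getD 3 0 + (d.getD 2 0))))) (a.getD 0 0 + (b.getD 2 0 + (c.getD 1 0 + (d.getD 3 0))))) (a.getD 0 0 + (b.getD 2 0 + (c.getD 3 0 + (d.getD 1 0))))) (a.getD 0 0 + (b.getD 3 0 + (c.getD 1 0 + (d.getD 2 0))))) (a.getD 0 0 + (b.getD 3 0 + (c.getD 2 0 + (d.getD 1 0))))) (a.getD 1 0 + (b.getD 0 0 + (c.getD 2 0 + (d.getD 3 0))))) (a.getD 1 0 + (b.getD 0 0 + (c.getD 3 0 + (d.getD 2 0))))) (a.getD 1 0 + (b.getD 2 0 + (c.getD 0 0 + (d.getD 3 0))))) (a.getD 1 0 + (b.getD 2 0 + (c.getD 3 0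 + (d.getD 0 0))))) (a.getD 1 0 + (b.getD 3 0 + (c.getD 0 0 + (d.getD 2 0))))) (a.getD 1 0 + (b.getD 3 0 + (c.getD 2 0 + (d.getD 0 0))))) (a.getD 2 0 + (b.getD 0 0 + (c.getD 1 0 + (d.getD 3 0))))) (a.getD 2 0 + (b.getD 0 0 + (c.getD 3 0 + (d.getD 1 0))))) (a.getD 2 0 + (b.getD 1 0 + (c.getD 0 0 + (d.getD 3 0))))) (a.getD 2 0 + (b.getD 1 0 + (c.getD 3 0 + (d.getD 0 0))))) (a.getD 2 0 + (b.getD 3 0 + (c.getD 0 0 + (d.getD 1 0))))) (a.getD 2 0 + (b.getD 3 0 + (c.getD 1 0 + (d.getD 0 0))))) (a.getD 3 0 + (b.getD 0 0 + (c.getD 1 0 + (d.getD 2 0))))) (a.getD 3 0 + (b.getD 0 0 + (c.getD 2 0 + (d.getD 1 0))))) (a.getD 3 0 + (b.getD 1 0 + (c.getD 0 0 + (d.getD 2 0))))) (a.getD 3 0 + (b.getD 1 0 + (c.getD 2 0 + (d.getD 0 0))))) (a.getD 3 0 + (b.getD 2 0 + (c.getD 0 0 + (d.getD 1 0))))) (a.getD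 3 0 + (b.getD 2 0 + (c.getD 1 0 + (d.getD 0 0)))) := by
  conv_lhs => rw [pvBest]
  conv_lhs => simp [pvBest_m1, pvBest_m2, pvBest_m4, pvBest_m8, PySem.List.max?_id_cons]
  simp only [pvAddMax]
  simp only [← max_assoc]
  simp only [List.getD_eq_getElem?_getD]

set_option maxHeartbeats 1000000 in
theorem pvKey (m00 m01 m02 m03 m10 m11 m12 m13 m20 m21 m22 m23 m30 m31 m32 m33 : Int) :
    ((PySem.List.max? (pvPerms4.map (fun pi =>
        ([0,1,2,3] : List Nat).foldl (fun acc j =>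
          acc + ([[m00,m01,m02,m03],[m10,m11,m12,m13],[m20,m21,m22,m23],[m30,m31,m32,m33]].getD j []).getD (pi.getD j 0) 0) 0))
      (fun x => x)).getD 0)
    = pvBest [[m00,m01,m02,m03],[m10,m11,m12,m13],[m20,m21,m22,m23],[m30,m31,m32,m33]] 0 := by
  rw [pvBest_m0]
  simp only [pvPerms4, List.map_cons, List.map_nil]
  simp only [List.foldl_cons, List.foldl_nil]
  simp only [pvGetD4_0, pvGetD4_1, pvGetD4_2, pvGetD4_3]
  simp only [PySem.List.max?_id_cons, List.foldl_cons, List.foldl_nil, Option.getD_some, zero_add, add_assoc]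
  try simp only [← max_assoc]
  try rfl

-- ===== VERDICT (by name: the statement is the Claim_ definition above) =====
theorem correct_word_count_spec : Claim_equal_correct_word_count := by
  intro pred gold _
  unfold Spec_correct_word_count correct_word_count correct_word_count_alt
  split
  · rfl
  split
  · rfl
  rename_i h1 h2
  simp only [Bool.or_eq_true, bne_iff_ne, not_or] at h1
  have hp : pred.length = 4 := by omega
  have hg : gold.length = 4 := by omega
  obtain ⟨p0, p1, p2, p3, rfl⟩ := pvLen4 pred hp
  obtain ⟨g0, g1, g2, g3, rfl⟩ := pvLen4 gold hg
  simp only [List.map_cons, List.map_nil]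
  exact pvKey _ _ _ _ _ _ _ _ _ _ _ _ _ _ _ _
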